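-- pv_equiv track=rewrite | github.com/nmrs/sotd_pipeline | sotd/match/fiber_processor.py | find_fiber_word_indices
-- ===== SOURCE A (Python) =====
-- def find_fiber_word_indices(
--     words: list[str], fiber_start: int, fiber_end: int
-- ) -> list[int]:
--     """Find indices of words that contain fiber information."""
--     fiber_indices = []
--     for i, word in enumerate(words):
--         if fiber_start <= i <= fiber_end:
--             fiber_indices.append(i)
--     return fiber_indices
-- ===== SOURCE B (Python) =====
-- def find_fiber_word_indices(
--     words: list[str], fiber_start: int, fiber_end: int
-- ) -> list[int]:
--     """Find indices of words that contain fiber information."""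
--     return list(range(max(0, fiber_start), min(len(words) - 1, fiber_end) + 1))
-- ===== Notes on version B (the rewrite author's own statement) =====
-- stated objective: simpler
-- what changed: Replaces the scan over all words with direct interval arithmetic: intersect [fiber_start, fiber_end] with [0, len(words)-1] and materialise that range as a list, never iterating over the word list.
import Mathlib
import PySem

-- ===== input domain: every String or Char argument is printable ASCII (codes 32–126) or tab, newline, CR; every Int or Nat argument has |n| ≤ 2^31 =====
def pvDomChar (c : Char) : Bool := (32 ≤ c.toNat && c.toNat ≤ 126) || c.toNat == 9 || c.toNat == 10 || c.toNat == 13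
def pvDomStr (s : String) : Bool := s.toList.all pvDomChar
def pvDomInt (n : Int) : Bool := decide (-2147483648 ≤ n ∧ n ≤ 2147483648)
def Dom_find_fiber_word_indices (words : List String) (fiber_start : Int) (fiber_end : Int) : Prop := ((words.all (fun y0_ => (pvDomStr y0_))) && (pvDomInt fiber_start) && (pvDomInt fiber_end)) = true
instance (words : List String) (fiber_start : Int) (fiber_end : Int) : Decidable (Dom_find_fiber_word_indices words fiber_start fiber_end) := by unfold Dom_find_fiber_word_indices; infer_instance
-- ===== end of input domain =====

-- ===== PORT A =====
-- A: scan enumerate(words), appending each index i with fiber_start <= i <= fiber_end.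
def find_fiber_word_indices (words : List String) (fiber_start : Int) (fiber_end : Int) : List Int :=
  (PySem.List.enumerate words 0).foldl
    (fun acc p => if fiber_start ≤ p.1 ∧ p.1 ≤ fiber_end then acc ++ [p.1] else acc) []

-- ===== PORT B =====
-- B: interval arithmetic, list(range(max(0, fiber_start), min(len(words)-1, fiber_end)+1)); no scan of words.
def find_fiber_word_indices_alt (words : List String) (fiber_start : Int) (fiber_end : Int) : List Int :=
  PySem.List.pyRange (max 0 fiber_start) (min ((words.length : Int) - 1) fiber_end + 1) 1

-- ===== PRECONDITION & SPEC =====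
def Spec_find_fiber_word_indices (words : List String) (fiber_start : Int) (fiber_end : Int) (out : List Int) : Prop := out = find_fiber_word_indices_alt words fiber_start fiber_end
instance (words : List String) (fiber_start : Int) (fiber_end : Int) (out : List Int) : Decidable (Spec_find_fiber_word_indices words fiber_start fiber_end out) := by unfold Spec_find_fiber_word_indices; infer_instance

-- ===== CLAIM (what is proved, stated in full; the proofs are below) =====
def Claim_equal_find_fiber_word_indices : Prop := ∀ (words : List String) (fiber_start : Int) (fiber_end : Int), Dom_find_fiber_word_indices words fiber_start fiber_end → Spec_find_fiber_word_indices words fiber_start fiber_end (find_fiber_word_indices words fiber_start fiber_end)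

-- ===== LEMMAS AND PROOFS =====

-- ===== VERDICT (by name: the statement is the Claim_ definition above) =====
lemma ffwi_foldl_append_ite {α β : Type} (p : α → Prop) [DecidablePred p] (f : α → β)
    (l : List α) (acc : List β) :
    l.foldl (fun acc x => if p x then acc ++ [f x] else acc) acc
      = acc ++ (l.filter (fun x => decide (p x))).map f := by
  induction l generalizing acc with
  | nil => simp
  | cons x xs ih =>
    simp only [List.foldl_cons, List.filter_cons]
    by_cases h : p x <;> simp [h, ih]

lemma ffwi_a_eq_filter (words : List String) (s e : Int) :
    find_fiber_word_indices words s e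
      = (PySem.List.pyRange 0 (words.length : Int) 1).filter
          (fun i => decide (s ≤ i ∧ i ≤ e)) := by
  unfold find_fiber_word_indices
  rw [ffwi_foldl_append_ite (p := fun p : Int × String => s ≤ p.1 ∧ p.1 ≤ e)
        (f := fun p : Int × String => p.1)]
  simp only [List.nil_append]
  have hfst : PySem.List.pyRange 0 (words.length : Int) 1
      = (PySem.List.enumerate words 0).map (fun p => p.1) := by
    simpa using (PySem.List.map_fst_enumerate (xs := words) (s := 0)).symm
  rw [hfst, List.filter_map]
  simp only [Function.comp_def]

lemma ffwi_filter_eq_range (n s e : Int) :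
    (PySem.List.pyRange 0 n 1).filter (fun i => decide (s ≤ i ∧ i ≤ e))
      = PySem.List.pyRange (max 0 s) (min (n - 1) e + 1) 1 := by
  have h1 : ((PySem.List.pyRange 0 n 1).filter
      (fun i => decide (s ≤ i ∧ i ≤ e))).Pairwise (· < ·) :=
    (PySem.List.pairwise_lt_pyRange_one 0 n).filter _
  have h2 : (PySem.List.pyRange (max 0 s) (min (n - 1) e + 1) 1).Pairwise (· < ·) :=
    PySem.List.pairwise_lt_pyRange_one _ _
  have hmem : ∀ x : Int,
      x ∈ (PySem.List.pyRange 0 n 1).filter (fun i => decide (s ≤ i ∧ i ≤ e)) ↔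
      x ∈ PySem.List.pyRange (max 0 s) (min (n - 1) e + 1) 1 := by
    intro x
    simp [List.mem_filter, PySem.List.mem_pyRange_one]
    omega
  exact List.Perm.eq_of_pairwise (fun a b _ _ hab hba => absurd hba (lt_asymm hab)) h1 h2
    ((List.perm_ext_iff_of_nodup (h1.imp ne_of_lt) (h2.imp ne_of_lt)).2 hmem)

theorem find_fiber_word_indices_spec : Claim_equal_find_fiber_word_indices := by
  intro words s e _
  unfold Spec_find_fiber_word_indices find_fiber_word_indices_alt
  rw [ffwi_a_eq_filter, ffwi_filter_eq_range]
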